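-- pv_equiv track=rewrite | github.com/LiXuanqi/leetcode-solutions | python3/751.ip-to-cidr.py | generate_cidr
-- ===== SOURCE A (Python) =====
-- def generate_cidr(x, count):
--     chunks = []
--
--     for _ in range(4):
--         chunks.append(str(x & 255))
--         x = x >> 8
--
--     length = 0
--     while count > 0:
--         length += 1
--         count = count >> 1
--     ip = '.'.join(reversed(chunks))
--     k = 32 - length + 1
--     return f'{ip}/{k}'
-- ===== SOURCE B (Python) =====
-- def generate_cidr(x, count):
--     h = format(x % 4294967296, '08x')
--     ip = '.'.join(str(int(h[i:i + 2], 16)) for i in range(0, 8, 2))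
--     k = 33 - len(format(count, 'b')) if count > 0 else 33
--     return f'{ip}/{k}'
-- ===== Notes on version B (the rewrite author's own statement) =====
-- stated objective: alternative
-- what changed: B goes through a textual representation: it formats x mod 2^32 as an 8-digit hex string, slices it into four 2-character chunks re-parsed as decimal octets, and gets the prefix length from the length of count's binary string representation, replacing A's mask/shift accumulation loop and its bit-halving while loop.
import Mathlib
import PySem

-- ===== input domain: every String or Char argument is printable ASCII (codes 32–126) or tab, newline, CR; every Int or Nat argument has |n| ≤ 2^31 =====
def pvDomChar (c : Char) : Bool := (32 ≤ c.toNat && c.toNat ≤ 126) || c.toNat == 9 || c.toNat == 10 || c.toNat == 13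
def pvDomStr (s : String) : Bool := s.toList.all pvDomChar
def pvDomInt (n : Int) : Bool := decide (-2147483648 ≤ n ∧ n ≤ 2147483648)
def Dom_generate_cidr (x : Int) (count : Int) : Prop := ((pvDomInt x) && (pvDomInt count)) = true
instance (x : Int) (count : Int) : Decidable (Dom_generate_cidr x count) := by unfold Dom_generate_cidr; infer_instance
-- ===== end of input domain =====

-- B computes the dotted quad by hex-string packing and slicing (and the prefix from the
-- binary string's length) instead of A's shift/mask loop and bit-halving loop; objective: alternative.


-- ===== PORT A =====
-- the `while count > 0: length += 1; count >>= 1` loop of A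
def lenLoop (count : Int) (length : Int) : Int :=
  if 0 < count then lenLoop (count >>> (1:Nat)) (length + 1) else length
termination_by count.toNat
decreasing_by
  rename_i h
  rw [Int.shiftRight_eq_div_pow]
  norm_num
  omega

def generate_cidr (x : Int) (count : Int) : String :=
  let st := (PySem.List.pyRange 0 4 1).foldl
      (fun (s : Int × List String) _ =>
        (s.1 >>> (8:Nat), s.2 ++ [PySem.Int.toStr (PySem.Int.band s.1 255)]))
      (x, ([] : List String))
  let chunks := st.2
  let length := lenLoop count 0
  let ip := PySem.Str.join "." chunks.reverse
  let k := 32 - length + 1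
  ip ++ "/" ++ PySem.Int.toStr k

-- ===== PORT B =====
-- hand port of format(v, '08x') — exact for 0 ≤ v < 2^32 (the only values B feeds it):
-- the eight lowercase hex digits of v, most significant first
def hexChar (d : Nat) : Char := Char.ofNat (if d < 10 then 48 + d else 87 + d)
def hexPad8 (v : Nat) : List Char :=
  [hexChar (v / 16^7 % 16), hexChar (v / 16^6 % 16), hexChar (v / 16^5 % 16),
   hexChar (v / 16^4 % 16), hexChar (v / 16^3 % 16), hexChar (v / 16^2 % 16),
   hexChar (v / 16 % 16), hexChar (v % 16)]
-- hand port of int(s, 16) — exact for nonempty lowercase hex-digit strings (B's slices)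
def hexVal (c : Char) : Nat := if 97 ≤ c.toNat then c.toNat - 87 else c.toNat - 48
def parseHex16 (l : List Char) : Int := l.foldl (fun a c => a * 16 + (hexVal c : Int)) 0
-- hand port of format(n, 'b') — exact for n > 0 (B only takes its length)
def binChars (n : Nat) : List Char :=
  if n = 0 then [] else binChars (n / 2) ++ [Char.ofNat (48 + n % 2)]

def generate_cidr_alt (x : Int) (count : Int) : String :=
  let h := hexPad8 (PySem.Int.mod x 4294967296).toNat
  let parts := (PySem.List.pyRange 0 8 2).map
      (fun i => PySem.Int.toStr (parseHex16 (PySem.List.slice h (some i) (some (i + 2)))))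
  let ip := PySem.Str.join "." parts
  let k : Int := if 0 < count then 33 - ((binChars count.toNat).length : Int) else 33
  ip ++ "/" ++ PySem.Int.toStr k

-- ===== PRECONDITION & SPEC =====
def Spec_generate_cidr (x : Int) (count : Int) (out : String) : Prop := out = generate_cidr_alt x count
instance (x : Int) (count : Int) (out : String) : Decidable (Spec_generate_cidr x count out) := by unfold Spec_generate_cidr; infer_instance

-- ===== CLAIM =====
def Claim_equal_generate_cidr : Prop := ∀ (x : Int) (count : Int), Dom_generate_cidr x count → Spec_generate_cidr x count (generate_cidr x count)

-- ===== LEMMAS AND PROOFS =====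
lemma band255 (x : Int) : PySem.Int.band x 255 = x % 256 := by
  unfold PySem.Int.band
  norm_num
  split_ifs with h
  · rw [show ((255:Int)).toNat = 2^8 - 1 from rfl, Nat.and_two_pow_sub_one_eq_mod]
    omega
  · rw [show ((255:Int)).toNat = 255 from rfl, Nat.and_comm,
      show (255:Nat) = 2^8 - 1 from rfl, Nat.and_two_pow_sub_one_eq_mod]
    omega

lemma shift8 (x : Int) : x >>> (8:Nat) = x / 256 := by
  rw [Int.shiftRight_eq_div_pow]; norm_num

lemma lenLoop_eq (n : Nat) : ∀ (count l : Int), count.toNat ≤ n →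
    lenLoop count l = l + (PySem.Int.bitLength (max count 0) : Int) := by
  induction n with
  | zero =>
    intro count l h
    rw [lenLoop.eq_def]
    have hc : ¬ 0 < count := by omega
    have hm : max count 0 = 0 := by omega
    simp [hc, hm, PySem.Int.bitLength_zero]
  | succ n ih =>
    intro count l h
    rw [lenLoop.eq_def]
    split_ifs with hc
    · have hsh : count >>> (1:Nat) = PySem.Int.floordiv count 2 := by
        rw [Int.shiftRight_eq_div_pow, PySem.Int.floordiv_eq_ediv_of_pos (by norm_num)]
        norm_num
      have hb : (count >>> (1:Nat)).toNat ≤ n := by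
        rw [Int.shiftRight_eq_div_pow]; norm_num; omega
      rw [ih _ _ hb]
      have hm : max count 0 = count := by omega
      have hm2 : max (count >>> (1:Nat)) 0 = count >>> (1:Nat) := by
        rw [Int.shiftRight_eq_div_pow]; norm_num; omega
      rw [hm, hm2, hsh, PySem.Int.bitLength_of_pos hc]
      push_cast
      ring
    · have hm : max count 0 = 0 := by omega
      simp [hm, PySem.Int.bitLength_zero]

lemma hexVal_hexChar (d : Nat) (hd : d < 16) : hexVal (hexChar d) = d := by
  interval_cases d <;> decide

lemma binChars_length : ∀ n : Nat, ((binChars n).length : Int) = PySem.Int.bitLength (n : Int) := by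
  intro n
  induction n using Nat.strong_induction_on with
  | _ n ih =>
    rw [binChars]
    by_cases h0 : n = 0
    · simp [h0, PySem.Int.bitLength_zero]
    · have hpos : 0 < n := Nat.pos_of_ne_zero h0
      rw [if_neg h0, PySem.Int.bitLength_natCast hpos]
      simp [ih (n / 2) (by omega)]

-- ===== VERDICT =====
theorem generate_cidr_spec : Claim_equal_generate_cidr := by
  intro x count _
  unfold Spec_generate_cidr generate_cidr generate_cidr_alt
  have hrangeA : PySem.List.pyRange 0 4 1 = [0,1,2,3] := by decide
  have hrangeB : PySem.List.pyRange 0 8 2 = [0,2,4,6] := by decide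
  rw [hrangeA, hrangeB]
  simp only [List.foldl, List.reverse, List.reverseAux, List.nil_append, List.cons_append,
    List.map, hexPad8]
  rw [band255, band255, band255, band255, shift8, shift8, shift8]
  -- evaluate B's four slices of the explicit 8-character list
  norm_num
  simp only [PySem.List.slice, PySem.List.clampIdx]
  norm_num [parseHex16, List.foldl]
  simp only [show Int.toNat 2 = 2 from rfl, show Int.toNat 4 = 4 from rfl,
    show Int.toNat 6 = 6 from rfl, show Int.toNat 8 = 8 from rfl]
  norm_num [List.take, List.drop, List.foldl]
  repeat rw [hexVal_hexChar _ (Nat.mod_lt _ (by norm_num))]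
  have hv : (((x % 4294967296).toNat : Int)) = x % 4294967296 :=
    Int.toNat_of_nonneg (Int.emod_nonneg x (by norm_num))
  have b3 : ((((x % 4294967296).toNat / 268435456 % 16 : Nat) : Int)) * 16
      + (((x % 4294967296).toNat / 16777216 % 16 : Nat) : Int) = x / 256 / 256 / 256 % 256 := by
    push_cast [hv]; omega
  have b2 : ((((x % 4294967296).toNat / 1048576 % 16 : Nat) : Int)) * 16
      + (((x % 4294967296).toNat / 65536 % 16 : Nat) : Int) = x / 256 / 256 % 256 := by
    push_cast [hv]; omega
  have b1 : ((((x % 4294967296).toNat / 4096 % 16 : Nat) : Int)) * 16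
      + (((x % 4294967296).toNat / 256 % 16 : Nat) : Int) = x / 256 % 256 := by
    push_cast [hv]; omega
  have b0 : ((((x % 4294967296).toNat / 16 % 16 : Nat) : Int)) * 16
      + (((x % 4294967296).toNat % 16 : Nat) : Int) = x % 256 := by
    push_cast [hv]; omega
  have hk : 32 - lenLoop count 0 + 1
      = (if 0 < count then 33 - (((binChars count.toNat).length : Nat) : Int) else 33) := by
    rw [lenLoop_eq count.toNat count 0 le_rfl, binChars_length]
    by_cases hc : 0 < count
    · have hm : max count 0 = count := by omega
      have hcc : ((count.toNat : Int)) = count := by omega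
      rw [if_pos hc, hm, hcc]; ring
    · have hm : max count 0 = 0 := by omega
      have hz : count.toNat = 0 := by omega
      rw [if_neg hc, hm]
      norm_num [PySem.Int.bitLength_zero]
  rw [b3, b2, b1, b0, hk]
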